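-- pv_equiv track=rewrite | github.com/carlosfreires/carlosfreires | scripts/generate_apis_cat.py | escape_svg
-- ===== SOURCE A (Python) =====
-- def escape_svg(text, max_length=100):
--     """Escapa caracteres especiais para SVG"""
--     if not text:
--         return ""
--     replacements = {
--         '&': '&amp;',
--         '<': '&lt;',
--         '>': '&gt;',
--         '"': '&quot;',
--         "'": '&apos;'
--     }
--     for char, replacement in replacements.items():
--         text = text.replace(char, replacement)
--
--     if len(text) > max_length:
--         return text[:max_length] + "..."
--     return text
-- ===== SOURCE B (Python) =====
-- def escape_svg(text, max_length=100):
--     """Escapa caracteres especiais para SVG"""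
--     if not text:
--         return ""
--     replacements = {
--         '&': '&amp;',
--         '<': '&lt;',
--         '>': '&gt;',
--         '"': '&quot;',
--         "'": '&apos;'
--     }
--     escaped = ''.join(replacements.get(c, c) for c in text)
--     if len(escaped) > max_length:
--         return escaped[:max_length] + "..."
--     return escaped
-- ===== Notes on version B (the rewrite author's own statement) =====
-- stated objective: alternative
-- what changed: B escapes in a single left-to-right pass over the characters using replacements.get(c, c) joined once, instead of A's five sequential whole-string str.replace passes (one per rule); the empty guard and truncation are unchanged.
import Mathlib
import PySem

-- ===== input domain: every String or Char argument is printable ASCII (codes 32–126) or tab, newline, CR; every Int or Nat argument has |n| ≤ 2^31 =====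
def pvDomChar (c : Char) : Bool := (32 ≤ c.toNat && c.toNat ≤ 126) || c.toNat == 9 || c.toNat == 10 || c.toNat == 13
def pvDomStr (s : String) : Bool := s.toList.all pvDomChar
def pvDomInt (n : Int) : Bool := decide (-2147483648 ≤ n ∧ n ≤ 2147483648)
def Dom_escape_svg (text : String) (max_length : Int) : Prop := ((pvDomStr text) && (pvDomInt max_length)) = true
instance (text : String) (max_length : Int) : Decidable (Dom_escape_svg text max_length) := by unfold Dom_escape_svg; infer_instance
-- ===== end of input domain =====

-- B escapes in ONE left-to-right pass over the characters (dict lookup per char) instead of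
-- A's five whole-string replace passes, then truncates identically; same return value everywhere.

-- ===== PORT A =====
def escape_svg (text : String) (max_length : Int) : String :=
  if text.toList = [] then ""
  else
    let t1 := PySem.Chars.replace text.toList ['&'] "&amp;".toList
    let t2 := PySem.Chars.replace t1 ['<'] "&lt;".toList
    let t3 := PySem.Chars.replace t2 ['>'] "&gt;".toList
    let t4 := PySem.Chars.replace t3 ['"'] "&quot;".toList
    let t5 := PySem.Chars.replace t4 ['\''] "&apos;".toList
    if (t5.length : Int) > max_length then
      String.ofList (PySem.Chars.slice t5 none (some max_length) ++ "...".toList)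
    else String.ofList t5

-- ===== PORT B =====
def pvReplB : PySem.Dict Char (List Char) :=
  (((((PySem.Dict.empty).insert '&' "&amp;".toList).insert '<' "&lt;".toList).insert
      '>' "&gt;".toList).insert '"' "&quot;".toList).insert '\'' "&apos;".toList

def escape_svg_alt (text : String) (max_length : Int) : String :=
  if text.toList = [] then ""
  else
    let escaped := PySem.Chars.join [] (text.toList.map (fun c => pvReplB.getD c [c]))
    if (escaped.length : Int) > max_length then
      String.ofList (PySem.Chars.slice escaped none (some max_length) ++ "...".toList)
    else String.ofList escaped

-- ===== PRECONDITION & SPEC =====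
def Spec_escape_svg (text : String) (max_length : Int) (out : String) : Prop := out = escape_svg_alt text max_length
instance (text : String) (max_length : Int) (out : String) : Decidable (Spec_escape_svg text max_length out) := by unfold Spec_escape_svg; infer_instance

-- ===== CLAIM (what is proved, stated in full; the proofs are below) =====
def Claim_equal_escape_svg : Prop := ∀ (text : String) (max_length : Int), Dom_escape_svg text max_length → Spec_escape_svg text max_length (escape_svg text max_length)

-- ===== LEMMAS AND PROOFS =====

-- per-character escape, the common denotation of both escape phases (proof-side only)
def pvEsc (c : Char) : List Char :=
  if c = '&' then "&amp;".toList
  else if c = '<' then "&lt;".toList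
  else if c = '>' then "&gt;".toList
  else if c = '"' then "&quot;".toList
  else if c = '\'' then "&apos;".toList
  else [c]

lemma replace_go_single (c0 : Char) (rep : List Char) :
    ∀ (fuel : Nat) (cs acc : List Char), cs.length ≤ fuel →
      PySem.Chars.replace.go [c0] rep fuel cs acc
        = acc.reverse ++ cs.flatMap (fun c => if c = c0 then rep else [c]) := by
  intro fuel
  induction fuel with
  | zero =>
    intro cs acc h
    have : cs = [] := List.length_eq_zero_iff.mp (Nat.le_zero.mp h)
    subst this; simp [PySem.Chars.replace.go]
  | succ n ih =>
    intro cs acc h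
    cases cs with
    | nil => simp [PySem.Chars.replace.go]
    | cons c t =>
      simp only [PySem.Chars.replace.go]
      by_cases hc : c = c0
      · subst hc
        rw [if_pos (by simp [List.isPrefixOf])]
        rw [ih _ _ (by simpa using Nat.le_of_succ_le_succ h)]
        simp
      · rw [if_neg (by simp [List.isPrefixOf]; exact fun h => hc h.symm)]
        rw [ih _ _ (by simpa using Nat.le_of_succ_le_succ h)]
        simp [hc]

lemma replace_single (cs : List Char) (c0 : Char) (rep : List Char) :
    PySem.Chars.replace cs [c0] rep = cs.flatMap (fun c => if c = c0 then rep else [c]) := by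
  simp only [PySem.Chars.replace, List.isEmpty_cons, Bool.false_eq_true, if_false]
  simpa using replace_go_single c0 rep cs.length cs [] le_rfl

lemma join_nil_flatten (l : List (List Char)) : PySem.Chars.join [] l = l.flatten := by
  induction l with
  | nil => rfl
  | cons a t ih =>
    cases t with
    | nil => simp [PySem.Chars.join_singleton]
    | cons b r => simp [PySem.Chars.join_cons_cons] at ih ⊢; simp [ih]

lemma getD_pvReplB (c : Char) : pvReplB.getD c [c] = pvEsc c := by
  by_cases h1 : c = '&'; · subst h1; decide
  by_cases h2 : c = '<'; · subst h2; decide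
  by_cases h3 : c = '>'; · subst h3; decide
  by_cases h4 : c = '"'; · subst h4; decide
  by_cases h5 : c = '\''; · subst h5; decide
  simp [pvReplB, PySem.Dict.getD, PySem.Dict.get?, PySem.Dict.insert, PySem.Dict.empty,
        pvEsc, h1, h2, h3, h4, h5, Ne.symm h1, Ne.symm h2, Ne.symm h3, Ne.symm h4, Ne.symm h5]

lemma chain_eq_flatMap (cs : List Char) :
    PySem.Chars.replace
      (PySem.Chars.replace
        (PySem.Chars.replace
          (PySem.Chars.replace
            (PySem.Chars.replace cs ['&'] "&amp;".toList)
            ['<'] "&lt;".toList)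
          ['>'] "&gt;".toList)
        ['"'] "&quot;".toList)
      ['\''] "&apos;".toList
      = cs.flatMap pvEsc := by
  simp only [replace_single, List.flatMap_assoc]
  apply List.flatMap_congr
  intro c _
  by_cases h1 : c = '&'; · subst h1; decide
  by_cases h2 : c = '<'; · subst h2; decide
  by_cases h3 : c = '>'; · subst h3; decide
  by_cases h4 : c = '"'; · subst h4; decide
  by_cases h5 : c = '\''; · subst h5; decide
  simp [pvEsc, h1, h2, h3, h4, h5]

-- ===== VERDICT (by name: the statement is the Claim_ definition above) =====
theorem escape_svg_spec : Claim_equal_escape_svg := by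
  intro text max_length _
  unfold Spec_escape_svg escape_svg escape_svg_alt
  by_cases he : text.toList = []
  · simp [he]
  · simp only [he, if_false]
    rw [chain_eq_flatMap]
    have key : PySem.Chars.join [] (List.map (fun c => pvReplB.getD c [c]) text.toList)
        = List.flatMap pvEsc text.toList := by
      rw [join_nil_flatten, List.flatMap_def]
      simp [getD_pvReplB]
    rw [key]
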